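-- pv_equiv track=rewrite | github.com/snickerdudle/advent_of_code | day_22/day_22.py | getOppositeLocation
-- ===== SOURCE A (Python) =====
-- def getOppositeLocation(loc, cur_dir, data):
--     new_loc = None
--     if cur_dir == 0:
--         # Facing right, search from left to right in this row
--         for i in range(0, loc[1] + 1):
--             if data[loc[0]][i] in [".", "#"]:
--                 new_loc = (
--                     loc[0],
--                     i,
--                 )
--                 break
--     elif cur_dir == 1:
--         # Facing down, search from top to bottom in this column
--         for i in range(0, loc[0] + 1):
--             if data[i][loc[1]] in [".", "#"]:
--                 new_loc = (
--                     i,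
--                     loc[1],
--                 )
--                 break
--     elif cur_dir == 2:
--         # Facing left, search from right to left in this row
--         for i in range(len(data[0]) - 1, loc[1] - 1, -1):
--             if data[loc[0]][i] in [".", "#"]:
--                 new_loc = (
--                     loc[0],
--                     i,
--                 )
--                 break
--     elif cur_dir == 3:
--         # Facing up, search from bottom to top in this column
--         for i in range(len(data) - 1, loc[0] - 1, -1):
--             if data[i][loc[1]] in [".", "#"]:
--                 new_loc = (
--                     i,
--                     loc[1],
--                 )
--                 break
--     else:
--         raise ValueError("Invalid direction")
--
--     return new_loc, cur_dir
-- ===== SOURCE B (Python) =====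
-- def getOppositeLocation(loc, cur_dir, data):
--     # Staged approach: enumerate the whole scan interval ASCENDING once, collect every
--     # walkable index (with total, try/except-guarded cell access), then select the
--     # answer as the first (dirs 0,1) or last (dirs 2,3) collected index.
--     def cell(r, i):
--         try:
--             return data[r][i]
--         except IndexError:
--             return None
--
--     r, c = loc
--     if cur_dir == 0:
--         hits = [i for i in range(0, c + 1) if cell(r, i) in (".", "#")]
--         new_loc = (r, hits[0]) if hits else None
--     elif cur_dir == 1:
--         hits = [i for i in range(0, r + 1) if cell(i, c) in (".", "#")]
--         new_loc = (hits[0], c) if hits else None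
--     elif cur_dir == 2:
--         hits = [i for i in range(c, len(data[0])) if cell(r, i) in (".", "#")]
--         new_loc = (r, hits[-1]) if hits else None
--     elif cur_dir == 3:
--         hits = [i for i in range(r, len(data)) if cell(i, c) in (".", "#")]
--         new_loc = (hits[-1], c) if hits else None
--     else:
--         raise ValueError("Invalid direction")
--     return new_loc, cur_dir
-- ===== Notes on version B (the rewrite author's own statement) =====
-- stated objective: alternative
-- what changed: A does four direction-specific early-exit scans in search order (descending for dirs 2/3); B enumerates the scan interval ascending exactly once, collects ALL walkable indices with a total try/except cell accessor, and then selects the answer by position (first hit for dirs 0/1, last hit for dirs 2/3), so no early break and a reversed traversal order for dirs 2/3.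
import Mathlib
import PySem

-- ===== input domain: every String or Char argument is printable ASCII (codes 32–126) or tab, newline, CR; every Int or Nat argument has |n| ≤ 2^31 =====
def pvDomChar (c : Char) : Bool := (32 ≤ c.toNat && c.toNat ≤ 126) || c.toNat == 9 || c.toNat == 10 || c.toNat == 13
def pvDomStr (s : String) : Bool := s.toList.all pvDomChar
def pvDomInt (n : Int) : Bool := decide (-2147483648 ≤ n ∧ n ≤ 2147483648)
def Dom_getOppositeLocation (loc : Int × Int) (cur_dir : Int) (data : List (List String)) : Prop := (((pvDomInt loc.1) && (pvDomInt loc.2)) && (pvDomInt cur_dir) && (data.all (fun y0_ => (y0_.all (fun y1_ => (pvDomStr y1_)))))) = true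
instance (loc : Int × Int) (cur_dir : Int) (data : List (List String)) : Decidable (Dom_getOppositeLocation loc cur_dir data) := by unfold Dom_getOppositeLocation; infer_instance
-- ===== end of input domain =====

-- B replaces A's four early-exit direction-order scans by one ascending collect-all-walkable pass
-- plus positional (first/last) selection (objective: alternative, same cost).

-- ===== PORT A =====
-- cell test data[r][i] in [".", "#"]; false where Python would raise IndexError (such inputs are outside Pre_)
def pvCellWalkA (data : List (List String)) (r i : Int) : Bool :=
  match PySem.List.pyGet? data r with
  | some row =>
    match PySem.List.pyGet? row i with
    | some s => s == "." || s == "#"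
    | none => false
  | none => false

-- the 'for i in …: if walkable: new_loc = (r, i); break' loop over a row
def pvLoopRowA (data : List (List String)) (r : Int) (idxs : List Int) : Option (Int × Int) :=
  match idxs with
  | [] => none
  | i :: rest => if pvCellWalkA data r i then some (r, i) else pvLoopRowA data r rest

-- the same loop shape over a column
def pvLoopColA (data : List (List String)) (c : Int) (idxs : List Int) : Option (Int × Int) :=
  match idxs with
  | [] => none
  | i :: rest => if pvCellWalkA data i c then some (i, c) else pvLoopColA data c rest

def getOppositeLocation (loc : Int × Int) (cur_dir : Int) (data : List (List String)) : (Option (Int × Int)) × Int :=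
  if cur_dir == 0 then
    (pvLoopRowA data loc.1 (PySem.List.pyRange 0 (loc.2 + 1) 1), cur_dir)
  else if cur_dir == 1 then
    (pvLoopColA data loc.2 (PySem.List.pyRange 0 (loc.1 + 1) 1), cur_dir)
  else if cur_dir == 2 then
    (pvLoopRowA data loc.1
      (PySem.List.pyRange ((((PySem.List.pyGet? data 0).getD []).length : Int) - 1) (loc.2 - 1) (-1)), cur_dir)
  else if cur_dir == 3 then
    (pvLoopColA data loc.2 (PySem.List.pyRange ((data.length : Int) - 1) (loc.1 - 1) (-1)), cur_dir)
  else
    (none, cur_dir)  -- Python raises ValueError here; outside Pre_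

-- ===== PORT B =====
-- B's guarded accessor cell(r, i): data[r][i], or None on IndexError (pyGet? is exactly Python indexing)
def pvCellB (data : List (List String)) (r i : Int) : Option String :=
  (PySem.List.pyGet? data r).bind (fun row => PySem.List.pyGet? row i)

-- 'cell(r, i) in (".", "#")'
def pvHitB (data : List (List String)) (r i : Int) : Bool :=
  match pvCellB data r i with
  | some s => s == "." || s == "#"
  | none => false

def getOppositeLocation_alt (loc : Int × Int) (cur_dir : Int) (data : List (List String)) : (Option (Int × Int)) × Int :=
  if cur_dir == 0 then
    -- hits = [i for i in range(0, c+1) if …]; (r, hits[0]) if hits else None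
    (((PySem.List.pyRange 0 (loc.2 + 1) 1).filter (fun i => pvHitB data loc.1 i)).head?.map
      (fun i => (loc.1, i)), cur_dir)
  else if cur_dir == 1 then
    (((PySem.List.pyRange 0 (loc.1 + 1) 1).filter (fun i => pvHitB data i loc.2)).head?.map
      (fun i => (i, loc.2)), cur_dir)
  else if cur_dir == 2 then
    -- hits over ascending range(c, len(data[0])); hits[-1]
    (((PySem.List.pyRange loc.2 ((((PySem.List.pyGet? data 0).getD []).length : Int)) 1).filter
        (fun i => pvHitB data loc.1 i)).getLast?.map (fun i => (loc.1, i)), cur_dir)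
  else if cur_dir == 3 then
    (((PySem.List.pyRange loc.1 ((data.length : Int)) 1).filter
        (fun i => pvHitB data i loc.2)).getLast?.map (fun i => (i, loc.2)), cur_dir)
  else
    (none, cur_dir)  -- Python raises ValueError here; outside Pre_

-- ===== PRECONDITION & SPEC =====
-- Pre_ holds exactly on the inputs where A raises no exception (valid direction and, per direction,
-- the scanned ray stays inside the grid or meets a walkable cell before leaving it), stated as
-- bounded bounds/membership conditions over the grid, not by running the scan.
def pvWalkP (s : String) : Bool := s == "." || s == "#"

def pvCellP (data : List (List String)) (r c : Int) : Option String :=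
  (PySem.List.pyGet? data r).bind (fun row => PySem.List.pyGet? row c)

def pvWalkCellP (data : List (List String)) (r c : Int) : Bool :=
  match pvCellP data r c with
  | some s => pvWalkP s
  | none => false

def pvNoRaiseP (loc : Int × Int) (cur_dir : Int) (data : List (List String)) : Bool :=
  let r := loc.1
  let c := loc.2
  if cur_dir == 0 then
    if c < 0 then true else
    match PySem.List.pyGet? data r with
    | none => false
    | some row => decide (c < (row.length : Int)) || row.any pvWalkP
  else if cur_dir == 1 then
    if r < 0 then true else
    let m := data.length
    (decide (r < (m : Int)) &&
      (List.range m).all (fun k => decide (r < (k : Int)) || (pvCellP data k c).isSome)) ||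
    (List.range m).any (fun k =>
      decide ((k : Int) ≤ r) && pvWalkCellP data k c &&
      (List.range k).all (fun j => (pvCellP data j c).isSome))
  else if cur_dir == 2 then
    match PySem.List.pyGet? data 0 with
    | none => false
    | some row0 =>
      let w := row0.length
      if (w : Int) - 1 < c then true else
      match PySem.List.pyGet? data r with
      | none => false
      | some row =>
        let L := row.length
        decide (w ≤ L) &&
          (decide (-(L : Int) ≤ c) ||
           (List.range (L + w)).any (fun t =>
             decide (c ≤ (t : Int) - L) &&
             (match PySem.List.pyGet? row ((t : Int) - L) with
              | some s => pvWalkP s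
              | none => false)))
  else if cur_dir == 3 then
    let m := data.length
    if (m : Int) - 1 < r then true else
    (decide (-(m : Int) ≤ r) &&
      (List.range (2 * m)).all (fun t =>
        decide ((t : Int) - m < r) || (pvCellP data ((t : Int) - m) c).isSome)) ||
    (List.range (2 * m)).any (fun t =>
      decide (r ≤ (t : Int) - m) && pvWalkCellP data ((t : Int) - m) c &&
      (List.range (2 * m)).all (fun u =>
        decide ((u : Int) - m ≤ (t : Int) - m) || (pvCellP data ((u : Int) - m) c).isSome))
  else false

def Pre_getOppositeLocation (loc : Int × Int) (cur_dir : Int) (data : List (List String)) : Prop :=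
  pvNoRaiseP loc cur_dir data = true
instance (loc : Int × Int) (cur_dir : Int) (data : List (List String)) : Decidable (Pre_getOppositeLocation loc cur_dir data) := by unfold Pre_getOppositeLocation; infer_instance

def pvWitness_getOppositeLocation : (Int × Int) × Int × List (List String) := ((0, 0), 0, [["."]])

def Spec_getOppositeLocation (loc : Int × Int) (cur_dir : Int) (data : List (List String)) (out : (Option (Int × Int)) × Int) : Prop := out = getOppositeLocation_alt loc cur_dir data
instance (loc : Int × Int) (cur_dir : Int) (data : List (List String)) (out : (Option (Int × Int)) × Int) : Decidable (Spec_getOppositeLocation loc cur_dir data out) := by unfold Spec_getOppositeLocation; infer_instance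

-- ===== CLAIM (what is proved, stated in full; the proofs are below) =====
def Claim_equal_getOppositeLocation : Prop := ∀ (loc : Int × Int) (cur_dir : Int) (data : List (List String)), Dom_getOppositeLocation loc cur_dir data → Pre_getOppositeLocation loc cur_dir data → Spec_getOppositeLocation loc cur_dir data (getOppositeLocation loc cur_dir data)

-- ===== LEMMAS AND PROOFS =====
-- A's inline walkable test and B's guarded-cell test agree
lemma walkA_eq_hitB (data : List (List String)) (r i : Int) :
    pvCellWalkA data r i = pvHitB data r i := by
  unfold pvCellWalkA pvHitB pvCellB
  cases PySem.List.pyGet? data r with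
  | none => rfl
  | some row => cases PySem.List.pyGet? row i <;> rfl

-- A's break-at-first-hit row loop = head of the filtered index list
lemma loopRowA_eq_head (data : List (List String)) (r : Int) (idxs : List Int) :
    pvLoopRowA data r idxs =
      ((idxs.filter (fun i => pvHitB data r i)).head?).map (fun i => (r, i)) := by
  induction idxs with
  | nil => rfl
  | cons i rest ih =>
    simp only [pvLoopRowA, List.filter, walkA_eq_hitB]
    by_cases h : pvHitB data r i = true <;> simp [h, ih]

lemma loopColA_eq_head (data : List (List String)) (c : Int) (idxs : List Int) :
    pvLoopColA data c idxs =
      ((idxs.filter (fun i => pvHitB data i c)).head?).map (fun i => (i, c)) := by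
  induction idxs with
  | nil => rfl
  | cons i rest ih =>
    simp only [pvLoopColA, List.filter, walkA_eq_hitB]
    by_cases h : pvHitB data i c = true <;> simp [h, ih]

-- A's descending scan range = reverse of B's ascending one
lemma pyRange_desc_eq_reverse (a b : Int) :
    PySem.List.pyRange (a - 1) (b - 1) (-1) = (PySem.List.pyRange b a 1).reverse := by
  rw [PySem.List.pyRange_neg_one_eq_reverse]
  have h1 : b - 1 + 1 = b := by ring
  have h2 : a - 1 + 1 = a := by ring
  rw [h1, h2]

-- ===== VERDICT (by name: the statement is the Claim_ definition above) =====
theorem getOppositeLocation_spec : Claim_equal_getOppositeLocation := by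
  intro loc cur_dir data _ _
  unfold Spec_getOppositeLocation getOppositeLocation getOppositeLocation_alt
  by_cases h0 : cur_dir == 0 <;> by_cases h1 : cur_dir == 1 <;>
    by_cases h2 : cur_dir == 2 <;> by_cases h3 : cur_dir == 3 <;>
    simp [h0, h1, h2, h3, loopRowA_eq_head, loopColA_eq_head, pyRange_desc_eq_reverse,
      List.filter_reverse, List.head?_reverse]
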